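-- pv_equiv track=rewrite | github.com/kieranmcgregor/Python | CryptographyJourney/sub_cypher_cracker.py | keyword_constructor
-- ===== SOURCE A (Python) =====
-- def keyword_constructor(key_letter_groups):
--     # self expanding for-loop sequence to account for lengthening
--     # cypher_length
--     keywords = {}
--
--     if len(key_letter_groups) > 5:
--         for idx1, letter1 in enumerate(key_letter_groups[0]):
--             for idx2, letter2 in enumerate(key_letter_groups[1]):
--                 for idx3, letter3 in enumerate(key_letter_groups[2]):
--                     for idx4, letter4 in enumerate(key_letter_groups[3]):
--                         for idx5, letter5 in enumerate(key_letter_groups[4]):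
--                             for idx6, letter6 in enumerate(key_letter_groups[5]):
--                                 keywords[(idx1, idx2, idx3, idx4, idx5, idx6)] = letter1 + letter2 + letter3 + letter4 + letter5 + letter6
--     elif len(key_letter_groups) > 4:
--         for idx1, letter1 in enumerate(key_letter_groups[0]):
--             for idx2, letter2 in enumerate(key_letter_groups[1]):
--                 for idx3, letter3 in enumerate(key_letter_groups[2]):
--                     for idx4, letter4 in enumerate(key_letter_groups[3]):
--                         for idx5, letter5 in enumerate(key_letter_groups[4]):
--                             keywords[(idx1, idx2, idx3, idx4, idx5)] = letter1 + letter2 + letter3 + letter4 + letter5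
--     elif len(key_letter_groups) > 3:
--         for idx1, letter1 in enumerate(key_letter_groups[0]):
--             for idx2, letter2 in enumerate(key_letter_groups[1]):
--                 for idx3, letter3 in enumerate(key_letter_groups[2]):
--                     for idx4, letter4 in enumerate(key_letter_groups[3]):
--                         keywords[(idx1, idx2, idx3, idx4)] = letter1 + letter2 + letter3 + letter4
--     elif len(key_letter_groups) > 2:
--         for idx1, letter1 in enumerate(key_letter_groups[0]):
--             for idx2, letter2 in enumerate(key_letter_groups[1]):
--                 for idx3, letter3 in enumerate(key_letter_groups[2]):
--                     keywords[(idx1, idx2, idx3)] = letter1 + letter2 + letter3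
--     elif len(key_letter_groups) > 1:
--         for idx1, letter1 in enumerate(key_letter_groups[0]):
--             for idx2, letter2 in enumerate(key_letter_groups[1]):
--                 keywords[(idx1, idx2)] = letter1 + letter2
--     else:
--         for idx, letter in enumerate(key_letter_groups):
--             keywords[(idx)] = letter
--
--     return keywords
-- ===== SOURCE B (Python) =====
-- def keyword_constructor(key_letter_groups):
--     # One generic product fold instead of six hard-coded nested-loop branches.
--     keywords = {}
--     if len(key_letter_groups) <= 1:
--         for idx, letter in enumerate(key_letter_groups):
--             keywords[idx] = letter
--         return keywords
--     combos = [((), '')]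
--     for group in key_letter_groups[:6]:
--         combos = [(key + (idx,), word + letter)
--                   for key, word in combos
--                   for idx, letter in enumerate(group)]
--     for key, word in combos:
--         keywords[key] = word
--     return keywords
-- ===== Notes on version B (the rewrite author's own statement) =====
-- stated objective: simpler
-- what changed: Replaces A's six hard-coded nested-loop branches (one per cypher length) with a single generic Cartesian-product fold over the first min(n,6) groups, accumulating (index-tuple, word) pairs.
-- outside the precondition, e.g. on keyword_constructor([['x', 'y']]): A returns {0: ['x', 'y']}, B returns {0: ['x', 'y']}
import Mathlib
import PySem

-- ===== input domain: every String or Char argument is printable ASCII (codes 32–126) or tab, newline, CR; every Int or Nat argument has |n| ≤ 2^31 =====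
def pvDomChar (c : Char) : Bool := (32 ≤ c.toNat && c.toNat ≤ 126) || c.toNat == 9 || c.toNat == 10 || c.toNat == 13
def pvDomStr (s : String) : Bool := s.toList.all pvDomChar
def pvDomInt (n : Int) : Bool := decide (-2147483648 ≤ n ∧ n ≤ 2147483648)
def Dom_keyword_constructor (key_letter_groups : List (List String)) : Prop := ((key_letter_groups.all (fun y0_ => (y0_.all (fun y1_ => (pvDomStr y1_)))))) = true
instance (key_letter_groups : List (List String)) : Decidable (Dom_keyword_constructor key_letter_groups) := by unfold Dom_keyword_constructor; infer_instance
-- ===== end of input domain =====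

-- B replaces A's six hard-coded nested-loop branches by one generic Cartesian-product fold (simpler; same cost).


-- ===== PORT A =====
def keyword_constructor (key_letter_groups : List (List String)) : List (List Int × String) :=
  (if key_letter_groups.length > 5 then
    (PySem.List.enumerate (key_letter_groups.getD 0 [])).foldl (fun d p1 =>
      (PySem.List.enumerate (key_letter_groups.getD 1 [])).foldl (fun d p2 =>
        (PySem.List.enumerate (key_letter_groups.getD 2 [])).foldl (fun d p3 =>
          (PySem.List.enumerate (key_letter_groups.getD 3 [])).foldl (fun d p4 =>
            (PySem.List.enumerate (key_letter_groups.getD 4 [])).foldl (fun d p5 =>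
              (PySem.List.enumerate (key_letter_groups.getD 5 [])).foldl (fun d p6 =>
                d.insert [p1.1, p2.1, p3.1, p4.1, p5.1, p6.1]
                  (p1.2 ++ p2.2 ++ p3.2 ++ p4.2 ++ p5.2 ++ p6.2)) d) d) d) d) d)
      (PySem.Dict.empty : PySem.Dict (List Int) String)
  else if key_letter_groups.length > 4 then
    (PySem.List.enumerate (key_letter_groups.getD 0 [])).foldl (fun d p1 =>
      (PySem.List.enumerate (key_letter_groups.getD 1 [])).foldl (fun d p2 =>
        (PySem.List.enumerate (key_letter_groups.getD 2 [])).foldl (fun d p3 =>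
          (PySem.List.enumerate (key_letter_groups.getD 3 [])).foldl (fun d p4 =>
            (PySem.List.enumerate (key_letter_groups.getD 4 [])).foldl (fun d p5 =>
              d.insert [p1.1, p2.1, p3.1, p4.1, p5.1]
                (p1.2 ++ p2.2 ++ p3.2 ++ p4.2 ++ p5.2)) d) d) d) d)
      (PySem.Dict.empty : PySem.Dict (List Int) String)
  else if key_letter_groups.length > 3 then
    (PySem.List.enumerate (key_letter_groups.getD 0 [])).foldl (fun d p1 =>
      (PySem.List.enumerate (key_letter_groups.getD 1 [])).foldl (fun d p2 =>
        (PySem.List.enumerate (key_letter_groups.getD 2 [])).foldl (fun d p3 =>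
          (PySem.List.enumerate (key_letter_groups.getD 3 [])).foldl (fun d p4 =>
            d.insert [p1.1, p2.1, p3.1, p4.1] (p1.2 ++ p2.2 ++ p3.2 ++ p4.2)) d) d) d)
      (PySem.Dict.empty : PySem.Dict (List Int) String)
  else if key_letter_groups.length > 2 then
    (PySem.List.enumerate (key_letter_groups.getD 0 [])).foldl (fun d p1 =>
      (PySem.List.enumerate (key_letter_groups.getD 1 [])).foldl (fun d p2 =>
        (PySem.List.enumerate (key_letter_groups.getD 2 [])).foldl (fun d p3 =>
          d.insert [p1.1, p2.1, p3.1] (p1.2 ++ p2.2 ++ p3.2)) d) d)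
      (PySem.Dict.empty : PySem.Dict (List Int) String)
  else if key_letter_groups.length > 1 then
    (PySem.List.enumerate (key_letter_groups.getD 0 [])).foldl (fun d p1 =>
      (PySem.List.enumerate (key_letter_groups.getD 1 [])).foldl (fun d p2 =>
        d.insert [p1.1, p2.1] (p1.2 ++ p2.2)) d)
      (PySem.Dict.empty : PySem.Dict (List Int) String)
  else
    -- Python's else branch stores int keys and whole-list values, which leave the declared
    -- return type; Pre_ excludes length 1, and for [] the loop body never runs.
    (PySem.Dict.empty : PySem.Dict (List Int) String)).items

-- ===== PORT B =====
def keyword_constructor_alt (key_letter_groups : List (List String)) : List (List Int × String) :=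
  if key_letter_groups.length ≤ 1 then
    -- Source B's degenerate branch stores int keys / list values (outside the declared type;
    -- excluded by Pre_ except for [], where the loop body never runs and the dict stays empty).
    (PySem.Dict.empty : PySem.Dict (List Int) String).items
  else
    let groups := key_letter_groups.take 6
    let combos := groups.foldl (fun combos g =>
      combos.flatMap (fun c =>
        (PySem.List.enumerate g).map (fun p => (c.1 ++ [p.1], c.2 ++ p.2))))
      [(([] : List Int), "")]
    (combos.foldl (fun d c => d.insert c.1 c.2)
      (PySem.Dict.empty : PySem.Dict (List Int) String)).items

-- ===== PRECONDITION & SPEC =====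
-- Pre_ excludes exactly the length-1 input, where A returns a dict with a bare int key and a
-- list-of-strings value — not a value of the declared return type dict[tuple[int,...], str].
def Pre_keyword_constructor (key_letter_groups : List (List String)) : Prop :=
  key_letter_groups.length ≠ 1
instance (key_letter_groups : List (List String)) : Decidable (Pre_keyword_constructor key_letter_groups) := by unfold Pre_keyword_constructor; infer_instance
def pvWitness_keyword_constructor : List (List String) := [["a", "b"], ["c"]]
def Spec_keyword_constructor (key_letter_groups : List (List String)) (out : List (List Int × String)) : Prop := out = keyword_constructor_alt key_letter_groups
instance (key_letter_groups : List (List String)) (out : List (List Int × String)) : Decidable (Spec_keyword_constructor key_letter_groups out) := by unfold Spec_keyword_constructor; infer_instance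

-- ===== CLAIM (what is proved, stated in full; the proofs are below) =====
def Claim_equal_keyword_constructor : Prop := ∀ (key_letter_groups : List (List String)), Dom_keyword_constructor key_letter_groups → Pre_keyword_constructor key_letter_groups → Spec_keyword_constructor key_letter_groups (keyword_constructor key_letter_groups)

-- ===== LEMMAS AND PROOFS =====

-- a loop whose body is itself a loop over (h x) is the flat loop over the flattened list
-- a fold of inserts is the fold of pvIns over the list of (key, value) pairs
def pvIns (d : PySem.Dict (List Int) String) (c : List Int × String) : PySem.Dict (List Int) String :=
  d.insert c.1 c.2

theorem pv_foldl_insert_map {β : Type} (l : List β) (k : β → List Int) (v : β → String)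
    (d : PySem.Dict (List Int) String) :
    l.foldl (fun d x => d.insert (k x) (v x)) d
      = (l.map (fun x => (k x, v x))).foldl pvIns d := by
  induction l generalizing d with
  | nil => rfl
  | cons a t ih => simp [ih, pvIns]

-- a loop whose body is itself a loop over (h x) is the flat loop over the flattened list
theorem pv_foldl_foldl {α β γ : Type} (l : List α) (h : α → List β) (f : γ → β → γ) (d : γ) :
    l.foldl (fun d x => (h x).foldl f d) d = (l.flatMap h).foldl f d := by
  induction l generalizing d with
  | nil => rfl
  | cons a t ih => simp [List.flatMap_cons, List.foldl_append, ih]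

-- ===== VERDICT (by name: the statement is the Claim_ definition above) =====
theorem keyword_constructor_spec : Claim_equal_keyword_constructor := by
  unfold Claim_equal_keyword_constructor
  intro gs _ hpre
  unfold Spec_keyword_constructor Pre_keyword_constructor at *
  rcases gs with _ | ⟨g0, _ | ⟨g1, _ | ⟨g2, _ | ⟨g3, _ | ⟨g4, _ | ⟨g5, rest⟩⟩⟩⟩⟩⟩
  · rfl
  · simp at hpre
  all_goals
    simp only [keyword_constructor, keyword_constructor_alt, List.length_cons,
      List.length_nil, List.getD, List.getElem?_cons_zero, List.getElem?_cons_succ,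
      Option.getD_some, List.take_succ_cons, List.take_zero, List.take_nil,
      List.foldl_cons, List.foldl_nil]
    norm_num
    simp only [pv_foldl_insert_map, pv_foldl_foldl]
    simp [List.flatMap_map, List.map_flatMap, List.flatMap_assoc,
      List.map_map, Function.comp_def]
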